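-- pv_equiv track=rewrite | github.com/erdalgunes/ustad-protocol-mcp | src/ustad/ultimate_bot.py | perform_swot
-- ===== SOURCE A (Python) =====
-- def perform_swot(problem: str, context: str) -> dict[str, list[str]]:
--     """Perform SWOT analysis."""
--     swot = {"strengths": [], "weaknesses": [], "opportunities": [], "threats": []}
--
--     text = f"{problem} {context}".lower()
--
--     # Identify strengths
--     if any(word in text for word in ["existing", "current", "have", "using"]):
--         swot["strengths"].append("Existing infrastructure/resources")
--     if any(word in text for word in ["experience", "knowledge", "team"]):
--         swot["strengths"].append("Team capabilities")
--
--     # Identify weaknesses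
--     if any(word in text for word in ["slow", "high", "problem", "issue"]):
--         swot["weaknesses"].append("Performance limitations")
--     if any(word in text for word in ["lack", "without", "no", "missing"]):
--         swot["weaknesses"].append("Resource gaps")
--
--     # Identify opportunities
--     if any(word in text for word in ["grow", "scale", "increase", "improve"]):
--         swot["opportunities"].append("Growth potential")
--     if any(word in text for word in ["new", "modern", "upgrade"]):
--         swot["opportunities"].append("Modernization benefits")
--
--     # Identify threats
--     if any(word in text for word in ["risk", "fail", "down", "break"]):
--         swot["threats"].append("Operational risks")
--     if any(word in text for word in ["compete", "market", "customer"]):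
--         swot["threats"].append("Market pressures")
--
--     return swot
-- ===== SOURCE B (Python) =====
-- RULES = [
--     ("strengths", "Existing infrastructure/resources"),
--     ("strengths", "Team capabilities"),
--     ("weaknesses", "Performance limitations"),
--     ("weaknesses", "Resource gaps"),
--     ("opportunities", "Growth potential"),
--     ("opportunities", "Modernization benefits"),
--     ("threats", "Operational risks"),
--     ("threats", "Market pressures"),
-- ]
--
-- KEYWORD_RULE = {
--     "existing": 0, "current": 0, "have": 0, "using": 0,
--     "experience": 1, "knowledge": 1, "team": 1,
--     "slow": 2, "high": 2, "problem": 2, "issue": 2,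
--     "lack": 3, "without": 3, "no": 3, "missing": 3,
--     "grow": 4, "scale": 4, "increase": 4, "improve": 4,
--     "new": 5, "modern": 5, "upgrade": 5,
--     "risk": 6, "fail": 6, "down": 6, "break": 6,
--     "compete": 7, "market": 7, "customer": 7,
-- }
--
--
-- def perform_swot(problem: str, context: str) -> dict[str, list[str]]:
--     """Perform SWOT analysis via a single left-to-right scan of the text.
--
--     Instead of one substring search per keyword, walk the text once and at
--     each position test which keywords start there (a naive multi-pattern
--     matcher), collecting the indices of the triggered rules; then emit the
--     labels grouped per category."""
--     text = f"{problem} {context}".lower()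
--     hit = set()
--     for i in range(len(text)):
--         for kw, rule in KEYWORD_RULE.items():
--             if rule not in hit and text.startswith(kw, i):
--                 hit.add(rule)
--     swot = {"strengths": [], "weaknesses": [], "opportunities": [], "threats": []}
--     for rule, (cat, label) in enumerate(RULES):
--         if rule in hit:
--             swot[cat].append(label)
--     return swot
-- ===== Notes on version B (the rewrite author's own statement) =====
-- stated objective: alternative
-- what changed: Replaced the eight per-keyword substring searches by a single left-to-right scan of the text: at each position a keyword->rule map is consulted for keywords starting there (naive multi-pattern matching into a hit-set), and the four category lists are then emitted from the hit rule indices.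
import Mathlib
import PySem

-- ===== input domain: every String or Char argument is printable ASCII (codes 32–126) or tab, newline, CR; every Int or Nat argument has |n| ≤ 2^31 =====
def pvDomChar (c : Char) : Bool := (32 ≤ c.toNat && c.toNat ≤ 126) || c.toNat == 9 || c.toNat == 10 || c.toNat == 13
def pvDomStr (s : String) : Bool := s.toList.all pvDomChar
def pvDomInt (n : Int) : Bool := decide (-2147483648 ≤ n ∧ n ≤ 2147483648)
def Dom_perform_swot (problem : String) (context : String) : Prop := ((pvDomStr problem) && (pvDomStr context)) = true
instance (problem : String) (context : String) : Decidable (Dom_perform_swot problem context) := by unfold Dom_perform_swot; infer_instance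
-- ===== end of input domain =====

-- B replaces the per-keyword substring searches by a single left-to-right scan of the text that marks
-- triggered rule indices in a hit-set (naive multi-pattern matching); alternative algorithm, same cost.


-- ===== PORT A =====
def perform_swot (problem : String) (context : String) : List (String × List String) :=
  let swot : PySem.Dict String (List String) :=
    ((((PySem.Dict.empty).insert "strengths" []).insert "weaknesses" []).insert
        "opportunities" []).insert "threats" []
  let text := PySem.Str.lower (problem ++ " " ++ context)
  let swot := if (["existing", "current", "have", "using"].any fun w => PySem.Str.isIn w text) then
      swot.modify "strengths" [] (· ++ ["Existing infrastructure/resources"]) else swot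
  let swot := if (["experience", "knowledge", "team"].any fun w => PySem.Str.isIn w text) then
      swot.modify "strengths" [] (· ++ ["Team capabilities"]) else swot
  let swot := if (["slow", "high", "problem", "issue"].any fun w => PySem.Str.isIn w text) then
      swot.modify "weaknesses" [] (· ++ ["Performance limitations"]) else swot
  let swot := if (["lack", "without", "no", "missing"].any fun w => PySem.Str.isIn w text) then
      swot.modify "weaknesses" [] (· ++ ["Resource gaps"]) else swot
  let swot := if (["grow", "scale", "increase", "improve"].any fun w => PySem.Str.isIn w text) then
      swot.modify "opportunities" [] (· ++ ["Growth potential"]) else swot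
  let swot := if (["new", "modern", "upgrade"].any fun w => PySem.Str.isIn w text) then
      swot.modify "opportunities" [] (· ++ ["Modernization benefits"]) else swot
  let swot := if (["risk", "fail", "down", "break"].any fun w => PySem.Str.isIn w text) then
      swot.modify "threats" [] (· ++ ["Operational risks"]) else swot
  let swot := if (["compete", "market", "customer"].any fun w => PySem.Str.isIn w text) then
      swot.modify "threats" [] (· ++ ["Market pressures"]) else swot
  swot.items

-- ===== PORT B =====
-- (rule index, category, label) rows of RULES, and the keyword -> rule-index dict, as in Source B
def swotRules : List (String × String) :=
  [("strengths", "Existing infrastructure/resources"),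
   ("strengths", "Team capabilities"),
   ("weaknesses", "Performance limitations"),
   ("weaknesses", "Resource gaps"),
   ("opportunities", "Growth potential"),
   ("opportunities", "Modernization benefits"),
   ("threats", "Operational risks"),
   ("threats", "Market pressures")]

def swotKeywordRule : List (String × Int) :=
  [("existing", 0), ("current", 0), ("have", 0), ("using", 0),
   ("experience", 1), ("knowledge", 1), ("team", 1),
   ("slow", 2), ("high", 2), ("problem", 2), ("issue", 2),
   ("lack", 3), ("without", 3), ("no", 3), ("missing", 3),
   ("grow", 4), ("scale", 4), ("increase", 4), ("improve", 4),
   ("new", 5), ("modern", 5), ("upgrade", 5),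
   ("risk", 6), ("fail", 6), ("down", 6), ("break", 6),
   ("compete", 7), ("market", 7), ("customer", 7)]

-- text.startswith(kw, i) with 0 ≤ i is ported by hand as Chars.startswith on the i-th suffix
-- (exact for the nonnegative start indices produced by range(len(text))).
def perform_swot_alt (problem : String) (context : String) : List (String × List String) :=
  let text := PySem.Str.lower (problem ++ " " ++ context)
  let hit : PySem.Set Int :=
    (PySem.List.pyRange 0 (PySem.Str.len text)).foldl (fun h i =>
      swotKeywordRule.foldl (fun h kr =>
        if !(h.contains kr.2) && PySem.Chars.startswith (text.toList.drop i.toNat) kr.1.toList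
        then h.add kr.2 else h) h) PySem.Set.empty
  let swot : PySem.Dict String (List String) :=
    ((((PySem.Dict.empty).insert "strengths" []).insert "weaknesses" []).insert
        "opportunities" []).insert "threats" []
  ((PySem.List.enumerate swotRules).foldl (fun d e =>
      if hit.contains e.1 then d.modify e.2.1 [] (· ++ [e.2.2]) else d) swot).items

-- ===== PRECONDITION & SPEC =====
def Spec_perform_swot (problem : String) (context : String) (out : List (String × List String)) : Prop := out = perform_swot_alt problem context
instance (problem : String) (context : String) (out : List (String × List String)) : Decidable (Spec_perform_swot problem context out) := by unfold Spec_perform_swot; infer_instance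

-- ===== CLAIM (what is proved, stated in full; the proofs are below) =====
def Claim_equal_perform_swot : Prop := ∀ (problem : String) (context : String), Dom_perform_swot problem context → Spec_perform_swot problem context (perform_swot problem context)

-- ===== LEMMAS AND PROOFS =====

-- membership in the hit-set after the inner keyword loop at one position
theorem mem_markAt (tl : List Char) (i : Int) (table : List (String × Int)) (h : PySem.Set Int) (r : Int) :
    r ∈ table.foldl (fun h kr =>
        if !(h.contains kr.2) && PySem.Chars.startswith (tl.drop i.toNat) kr.1.toList
        then h.add kr.2 else h) h ↔
      r ∈ h ∨ ∃ kr ∈ table, kr.2 = r ∧ PySem.Chars.startswith (tl.drop i.toNat) kr.1.toList = true := by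
  induction table generalizing h with
  | nil => simp
  | cons kr rest ih =>
    simp only [List.foldl_cons, ih, List.exists_mem_cons_iff]
    by_cases hm : h.contains kr.2 = true <;>
    by_cases hs : PySem.Chars.startswith (tl.drop i.toNat) kr.1.toList = true
    · have hm' : kr.2 ∈ h := (PySem.Set.contains_iff h kr.2).mp hm
      have himp : kr.2 = r → r ∈ h := fun e => e ▸ hm'
      simp only [hm, hs, Bool.not_true, Bool.false_and, Bool.false_eq_true, if_false, and_true]
      tauto
    · simp [hs]
    · simp only [hm, hs, Bool.not_false, Bool.true_and, if_true, PySem.Set.mem_add, and_true]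
      have hcomm : (r = kr.2) ↔ (kr.2 = r) := eq_comm
      tauto
    · simp [hs]

-- membership in the hit-set after the whole scan
theorem mem_scan (tl : List Char) (idxs : List Int) (table : List (String × Int)) (h : PySem.Set Int) (r : Int) :
    r ∈ idxs.foldl (fun h i =>
        table.foldl (fun h kr =>
          if !(h.contains kr.2) && PySem.Chars.startswith (tl.drop i.toNat) kr.1.toList
          then h.add kr.2 else h) h) h ↔
      r ∈ h ∨ ∃ i ∈ idxs, ∃ kr ∈ table, kr.2 = r ∧ PySem.Chars.startswith (tl.drop i.toNat) kr.1.toList = true := by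
  induction idxs generalizing h with
  | nil => simp
  | cons i rest ih =>
    simp only [List.foldl_cons, ih, mem_markAt, List.mem_cons]
    constructor
    · rintro ((hr | ⟨kr, m, e, s⟩) | ⟨j, mj, w⟩)
      · exact Or.inl hr
      · exact Or.inr ⟨i, Or.inl rfl, kr, m, e, s⟩
      · exact Or.inr ⟨j, Or.inr mj, w⟩
    · rintro (hr | ⟨j, mj | mj, w⟩)
      · exact Or.inl (Or.inl hr)
      · subst mj; exact Or.inl (Or.inr w)
      · exact Or.inr ⟨j, mj, w⟩

-- existence of a scan position where a nonempty keyword starts = substring containment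
theorem scan_hits_iff_isIn (tl : List Char) (kw : List Char) (hkw : kw ≠ []) :
    (∃ i ∈ PySem.List.pyRange 0 (tl.length : Int),
        PySem.Chars.startswith (tl.drop i.toNat) kw = true) ↔ PySem.Chars.isIn kw tl = true := by
  rw [← PySem.Chars.exists_prefix_drop_iff_isIn]
  constructor
  · rintro ⟨i, _, hs⟩
    exact ⟨i.toNat, (PySem.Chars.startswith_iff _ _).mp hs⟩
  · rintro ⟨j, hj⟩
    have hjlt : j < tl.length := by
      by_contra hge
      rw [not_lt] at hge
      rw [List.drop_eq_nil_of_le hge] at hj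
      exact hkw (List.prefix_nil.mp hj)
    refine ⟨(j : Int), ?_, ?_⟩
    · rw [PySem.List.mem_pyRange_one]
      constructor
      · exact Int.natCast_nonneg j
      · exact_mod_cast hjlt
    · rw [PySem.Chars.startswith_iff]
      simpa using hj
 
-- the hit-set's answer per rule index, against A's per-rule 'any keyword in text' Bool
theorem contains_scan (text : String) (r : Int) :
    ((PySem.List.pyRange 0 (PySem.Str.len text)).foldl (fun h i =>
        swotKeywordRule.foldl (fun h kr =>
          if !(h.contains kr.2) && PySem.Chars.startswith (text.toList.drop i.toNat) kr.1.toList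
          then h.add kr.2 else h) h) PySem.Set.empty).contains r =
      swotKeywordRule.any (fun kr => kr.2 == r && PySem.Str.isIn kr.1 text) := by
  rw [Bool.eq_iff_iff, PySem.Set.contains_iff, PySem.Str.len_eq, mem_scan, List.any_eq_true]
  constructor
  · rintro (hr | ⟨i, mi, kr, m, e, s⟩)
    · simp [PySem.Set.empty] at hr
    · refine ⟨kr, m, ?_⟩
      have hkw : kr.1.toList ≠ [] := by
        fin_cases m <;> simp
      have : PySem.Chars.isIn kr.1.toList text.toList = true :=
        (scan_hits_iff_isIn text.toList kr.1.toList hkw).mp ⟨i, mi, s⟩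
      simp [e, this]
  · rintro ⟨kr, m, hb⟩
    rw [Bool.and_eq_true, beq_iff_eq] at hb
    have hkw : kr.1.toList ≠ [] := by
      fin_cases m <;> simp
    have hin : PySem.Chars.isIn kr.1.toList text.toList = true := by
      rw [PySem.Chars.isIn_iff_infix, ← PySem.Str.isIn_iff_infix]; exact hb.2
    rcases (scan_hits_iff_isIn text.toList kr.1.toList hkw).mpr hin with ⟨i, mi, s⟩
    exact Or.inr ⟨i, mi, kr, m, hb.1, s⟩

-- ===== VERDICT (by name: the statement is the Claim_ definition above) =====
theorem perform_swot_spec : Claim_equal_perform_swot := by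
  intro problem context _
  unfold Spec_perform_swot perform_swot perform_swot_alt
  simp only [contains_scan]
  simp only [swotRules, swotKeywordRule, PySem.List.enumerate, List.foldl_cons, List.foldl_nil,
    List.any_cons, List.any_nil]
  norm_num
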